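-- pv_equiv track=rewrite | github.com/CrlsK/optspec-scheduling-solver | qcentroid.py | _count_changeovers
-- ===== SOURCE A (Python) =====
-- def _count_changeovers(schedule):
--     by_m: dict = {}
--     for s in schedule:
--         by_m.setdefault(s["machine_id"], []).append(s)
--     changeovers = 0
--     for segs in by_m.values():
--         segs.sort(key=lambda x: x["start"])
--         for a, b in zip(segs, segs[1:]):
--             if a["job_id"] != b["job_id"]:
--                 changeovers += 1
--     return changeovers
-- ===== SOURCE B (Python) =====
-- def _count_changeovers(schedule):
--     changeovers = 0
--     last = {}
--     for s in sorted(schedule, key=lambda x: x["start"]):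
--         m = s["machine_id"]
--         prev = last.get(m)
--         if prev is not None and prev["job_id"] != s["job_id"]:
--             changeovers += 1
--         last[m] = s
--     return changeovers
-- ===== Notes on version B (the rewrite author's own statement) =====
-- stated objective: alternative
-- what changed: Replaces per-machine grouping followed by a sort of every group and a pairwise zip scan with one global stable sort by start and a single linear pass keeping each machine's last segment in a dict.
import Mathlib
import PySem

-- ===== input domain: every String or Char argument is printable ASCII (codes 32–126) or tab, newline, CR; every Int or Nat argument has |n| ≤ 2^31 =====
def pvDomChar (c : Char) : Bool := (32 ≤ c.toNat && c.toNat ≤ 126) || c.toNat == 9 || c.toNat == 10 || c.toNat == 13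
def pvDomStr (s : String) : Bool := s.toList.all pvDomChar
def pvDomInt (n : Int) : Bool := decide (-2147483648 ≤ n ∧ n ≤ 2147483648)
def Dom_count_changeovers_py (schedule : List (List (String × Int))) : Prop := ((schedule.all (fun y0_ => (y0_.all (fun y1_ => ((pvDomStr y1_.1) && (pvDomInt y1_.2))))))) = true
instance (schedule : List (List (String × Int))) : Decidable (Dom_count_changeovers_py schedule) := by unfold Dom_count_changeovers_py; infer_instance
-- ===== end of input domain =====

-- B replaces per-machine grouping + per-group sorts + zip scans by one global stable sort by start
-- and a single last-job pass (alternative decomposition, same result; A mutates only its own internal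
-- group lists, never the argument).


-- s["k"]: first-match lookup in the entry's association list (Pre_ guarantees the key is present,
-- so the default 0 is never read on admitted inputs)
def pvKey (s : List (String × Int)) (k : String) : Int := (PySem.Dict.mk s).getD k 0

-- ===== PORT A =====
def count_changeovers_py (schedule : List (List (String × Int))) : Int :=
  let by_m : PySem.Dict Int (List (List (String × Int))) :=
    schedule.foldl (fun d s => d.modify (pvKey s "machine_id") [] (fun l => l ++ [s])) PySem.Dict.empty
  by_m.values.foldl
    (fun changeovers segs =>
      let segs2 := PySem.List.sorted segs (fun x => pvKey x "start")
      (segs2.zip (PySem.List.slice segs2 (some 1))).foldl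
        (fun c ab => if pvKey ab.1 "job_id" ≠ pvKey ab.2 "job_id" then c + 1 else c) changeovers)
    0

-- ===== PORT B =====
-- loop body of B: p = (changeovers so far, dict of each machine's last segment)
def pvBStep (p : Int × PySem.Dict Int (List (String × Int))) (s : List (String × Int)) :
    Int × PySem.Dict Int (List (String × Int)) :=
  let m := pvKey s "machine_id"
  let c := match p.2.get? m with
    | some prev => if pvKey prev "job_id" ≠ pvKey s "job_id" then p.1 + 1 else p.1
    | none => p.1
  (c, p.2.insert m s)

def count_changeovers_py_alt (schedule : List (List (String × Int))) : Int :=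
  ((PySem.List.sorted schedule (fun x => pvKey x "start")).foldl pvBStep
    ((0 : Int), (PySem.Dict.empty : PySem.Dict Int (List (String × Int))))).1

-- ===== PRECONDITION & SPEC =====
-- Pre_ is exactly where A (and B) return without a KeyError: every entry has "machine_id" and "start",
-- and every entry sharing its machine with another entry also has "job_id".
def Pre_count_changeovers_py (schedule : List (List (String × Int))) : Prop :=
  ∀ s ∈ schedule, (PySem.Dict.mk s).contains "machine_id" = true ∧
    (PySem.Dict.mk s).contains "start" = true ∧
    (2 ≤ schedule.countP (fun t => pvKey t "machine_id" == pvKey s "machine_id") →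
      (PySem.Dict.mk s).contains "job_id" = true)
instance (schedule : List (List (String × Int))) : Decidable (Pre_count_changeovers_py schedule) := by
  unfold Pre_count_changeovers_py; infer_instance
def pvWitness_count_changeovers_py : (List (List (String × Int))) :=
  [[("machine_id", 1), ("start", 0), ("job_id", 2)], [("machine_id", 1), ("start", 3), ("job_id", 5)]]
def Spec_count_changeovers_py (schedule : List (List (String × Int))) (out : Int) : Prop :=
  out = count_changeovers_py_alt schedule
instance (schedule : List (List (String × Int))) (out : Int) : Decidable (Spec_count_changeovers_py schedule out) := by
  unfold Spec_count_changeovers_py; infer_instance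

-- ===== CLAIM (what is proved, stated in full; the proofs are below) =====
def Claim_equal_count_changeovers_py : Prop := ∀ (schedule : List (List (String × Int))), Dom_count_changeovers_py schedule → Pre_count_changeovers_py schedule → Spec_count_changeovers_py schedule (count_changeovers_py schedule)

-- ===== LEMMAS AND PROOFS =====

-- number of adjacent pairs with different job_id
def adjCount : List (List (String × Int)) → Int
  | a :: b :: t => (if pvKey a "job_id" ≠ pvKey b "job_id" then 1 else 0) + adjCount (b :: t)
  | _ => 0

-- the entries of machine m, in order
def filterM (m : Int) (X : List (List (String × Int))) : List (List (String × Int)) :=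
  X.filter (fun s => pvKey s "machine_id" == m)

-- distinct machine ids in first-occurrence order
def machines (X : List (List (String × Int))) : List Int :=
  PySem.Set.ofList (X.map (fun s => pvKey s "machine_id"))

-- contribution of appending an entry with job j after a history whose last entry is o
def delta (o : Option (List (String × Int))) (j : Int) : Int :=
  match o with
  | some prev => if pvKey prev "job_id" ≠ j then 1 else 0
  | none => 0

theorem lem_zipfold : ∀ (l : List (List (String × Int))) (acc : Int),
    ((l.zip (l.drop 1)).foldl
      (fun c ab => if pvKey ab.1 "job_id" ≠ pvKey ab.2 "job_id" then c + 1 else c) acc)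
      = acc + adjCount l
  | [], acc => by simp [adjCount]
  | [a], acc => by simp [adjCount]
  | a :: b :: t, acc => by
    have ih := lem_zipfold (b :: t) (if pvKey a "job_id" ≠ pvKey b "job_id" then acc + 1 else acc)
    simp only [List.drop_succ_cons, List.drop_zero, List.zip_cons_cons, List.foldl_cons] at ih ⊢
    rw [ih, adjCount]
    split_ifs <;> ring

theorem lem_adj_append : ∀ (l : List (List (String × Int))) (e : List (String × Int)),
    adjCount (l ++ [e]) = adjCount l + delta l.getLast? (pvKey e "job_id")
  | [], e => by simp [adjCount, delta]
  | [a], e => by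
    simp only [List.cons_append, List.nil_append, adjCount, delta, List.getLast?_singleton]
    split_ifs <;> ring
  | a :: b :: t, e => by
    have ih := lem_adj_append (b :: t) e
    show (if _ then _ else _) + adjCount (b :: t ++ [e]) = _
    rw [ih]
    rw [adjCount, List.getLast?_cons_cons]
    ring

theorem lem_sum_update : ∀ (M : List Int) (f f' : Int → Int) (me : Int) (δ : Int),
    M.Nodup → me ∈ M → f' me = f me + δ → (∀ m ∈ M, m ≠ me → f' m = f m) →
    (M.map f').sum = (M.map f).sum + δ
  | [], f, f', me, δ, hnd, hmem, h1, h2 => by simp at hmem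
  | a :: M, f, f', me, δ, hnd, hmem, h1, h2 => by
    rcases List.nodup_cons.mp hnd with ⟨hna, hndM⟩
    by_cases ha : me = a
    · subst ha
      have : M.map f' = M.map f := List.map_congr_left (fun m hm => h2 m (List.mem_cons_of_mem _ hm) (fun h => hna (h ▸ hm)))
      simp [this, h1]; ring
    · have hmem' : me ∈ M := by
        rcases List.mem_cons.mp hmem with h | h
        · exact absurd h ha
        · exact h
      have ih := lem_sum_update M f f' me δ hndM hmem' h1 (fun m hm => h2 m (List.mem_cons_of_mem _ hm))
      have hfa : f' a = f a := h2 a (List.mem_cons_self) (fun h => ha (h.symm))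
      simp [ih, hfa]; ring

theorem lem_bstep (p : Int × PySem.Dict Int (List (String × Int))) (s : List (String × Int)) :
    pvBStep p s = (p.1 + delta (p.2.get? (pvKey s "machine_id")) (pvKey s "job_id"),
                   p.2.insert (pvKey s "machine_id") s) := by
  cases h : p.2.get? (pvKey s "machine_id") with
  | none => simp [pvBStep, delta, h]
  | some prev =>
    simp only [pvBStep, delta, h]
    split_ifs <;> simp

theorem lem_bdict (X : List (List (String × Int))) (m : Int) :
    ((X.foldl pvBStep ((0 : Int), (PySem.Dict.empty : PySem.Dict Int (List (String × Int))))).2).get? m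
      = (filterM m X).getLast? := by
  induction X using List.reverseRecOn with
  | nil => simp [filterM, PySem.Dict.empty, PySem.Dict.get?]
  | append_singleton X e ih =>
    rw [List.foldl_append, List.foldl_cons, List.foldl_nil, lem_bstep]
    by_cases hm : m = pvKey e "machine_id"
    · subst hm
      rw [show ((X.foldl pvBStep (0, PySem.Dict.empty)).2.insert (pvKey e "machine_id") e).get? (pvKey e "machine_id") = some e from by
        simp]
      have : filterM (pvKey e "machine_id") (X ++ [e]) = filterM (pvKey e "machine_id") X ++ [e] := by
        simp [filterM]
      rw [this, List.getLast?_concat]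
    · rw [PySem.Dict.get?_insert, if_neg hm, ih]
      have : filterM m (X ++ [e]) = filterM m X := by
        simp [filterM, List.filter_append]
        intro h; exact absurd h.symm hm
      rw [this]

theorem lem_insertBy_pairwise {α : Type} (key : α → Int) (x : α) (l : List α)
    (h : l.Pairwise (fun a b => key a ≤ key b)) :
    (PySem.List.insertBy (fun a b => decide (key a < key b)) x l).Pairwise (fun a b => key a ≤ key b) := by
  induction l with
  | nil => simp [PySem.List.insertBy]
  | cons y ys ih =>
    rw [PySem.List.insertBy]
    rcases List.pairwise_cons.mp h with ⟨hy, hys⟩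
    by_cases hlt : key x < key y
    · simp only [hlt, decide_true, if_true]
      refine List.pairwise_cons.mpr ⟨?_, h⟩
      intro b hb
      rcases List.mem_cons.mp hb with rfl | hb
      · exact le_of_lt hlt
      · exact le_trans (le_of_lt hlt) (hy b hb)
    · simp only [hlt, decide_false]
      refine List.pairwise_cons.mpr ⟨?_, ih hys⟩
      intro b hb
      rcases (PySem.List.mem_insertBy _ _ _ _).mp hb with rfl | hb
      · exact le_of_not_gt hlt
      · exact hy b hb

theorem lem_filter_insertBy {α : Type} (key : α → Int) (p : α → Bool) (x : α) (l : List α)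
    (h : l.Pairwise (fun a b => key a ≤ key b)) :
    (PySem.List.insertBy (fun a b => decide (key a < key b)) x l).filter p
      = if p x then PySem.List.insertBy (fun a b => decide (key a < key b)) x (l.filter p)
        else l.filter p := by
  induction l with
  | nil =>
    rw [PySem.List.insertBy]
    by_cases hpx : p x
    · simp [List.filter_cons_of_pos hpx, hpx, PySem.List.insertBy]
    · simp [List.filter_cons_of_neg hpx, hpx]
  | cons y ys ih =>
    rcases List.pairwise_cons.mp h with ⟨hy, hys⟩
    rw [PySem.List.insertBy]
    by_cases hlt : key x < key y
    · rw [if_pos (by simpa using hlt)]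
      -- filter p (x::y::ys) = if p x then x :: filter p (y::ys) else filter p (y::ys)
      have hins : ∀ l', (∀ z ∈ l', key x < key z) →
          PySem.List.insertBy (fun a b => decide (key a < key b)) x l' = x :: l' := by
        intro l' hl'
        cases l' with
        | nil => rw [PySem.List.insertBy]
        | cons z zs => rw [PySem.List.insertBy, if_pos (by simpa using hl' z List.mem_cons_self)]
      by_cases hpx : p x
      · rw [if_pos hpx, List.filter_cons_of_pos hpx]
        rw [hins ((y::ys).filter p) ?_]
        intro z hz
        rcases List.mem_cons.mp (List.mem_of_mem_filter hz) with rfl | hz'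
        · exact hlt
        · exact lt_of_lt_of_le hlt (hy z hz')
      · rw [if_neg hpx, List.filter_cons_of_neg hpx]
    · rw [if_neg (by simpa using hlt)]
      by_cases hpy : p y
      · rw [List.filter_cons_of_pos hpy, List.filter_cons_of_pos hpy, ih hys]
        by_cases hpx : p x
        · rw [if_pos hpx, if_pos hpx, PySem.List.insertBy, if_neg (by simpa using hlt)]
        · rw [if_neg hpx, if_neg hpx]
      · rw [List.filter_cons_of_neg hpy, List.filter_cons_of_neg hpy, ih hys]

theorem lem_filter_foldl_ins {α : Type} (key : α → Int) (p : α → Bool) :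
    ∀ (X : List α) (acc : List α), acc.Pairwise (fun a b => key a ≤ key b) →
    (X.foldl (fun acc x => PySem.List.insertBy (fun a b => decide (key a < key b)) x acc) acc).filter p
      = (X.filter p).foldl (fun acc x => PySem.List.insertBy (fun a b => decide (key a < key b)) x acc)
          (acc.filter p)
  | [], acc, h => by simp
  | x :: X, acc, h => by
    rw [List.foldl_cons, lem_filter_foldl_ins key p X _ (lem_insertBy_pairwise key x acc h)]
    rw [lem_filter_insertBy key p x acc h]
    by_cases hpx : p x
    · rw [if_pos hpx, List.filter_cons_of_pos hpx, List.foldl_cons]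
    · rw [if_neg hpx, List.filter_cons_of_neg hpx]

theorem lem_sorted_filter {α : Type} (key : α → Int) (p : α → Bool) (X : List α) :
    (PySem.List.sorted X key).filter p = PySem.List.sorted (X.filter p) key := by
  rw [PySem.List.sorted_eq_foldl_insertBy, PySem.List.sorted_eq_foldl_insertBy,
    lem_filter_foldl_ins key p X [] (List.Pairwise.nil)]
  rfl

theorem lem_A (schedule : List (List (String × Int))) :
    count_changeovers_py schedule
      = ((machines schedule).map
          (fun m => adjCount (PySem.List.sorted (filterM m schedule) (fun x => pvKey x "start")))).sum := by
  unfold count_changeovers_py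
  set by_m := schedule.foldl (fun d s => d.modify (pvKey s "machine_id") [] (fun l => l ++ [s])) PySem.Dict.empty with hbym
  -- keys
  have hkeys : by_m.keys = machines schedule := by
    have hk := PySem.Dict.keys_foldl_modify_key schedule (fun s => pvKey s "machine_id") []
      (fun _ s => (fun l => l ++ [s])) PySem.Dict.empty
    simp only [hbym]
    rw [hk]
    simp [PySem.Set.update_eq_append_filter, PySem.Dict.empty, PySem.Dict.keys, machines,
      PySem.Set.contains]
  have hnd : by_m.keys.Nodup := by
    exact PySem.Dict.nodup_keys_foldl_modify_key schedule (fun s => pvKey s "machine_id") []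
      (fun _ s => (fun l => l ++ [s])) PySem.Dict.empty (by simp [PySem.Dict.empty, PySem.Dict.keys])
  have hvals : by_m.values = by_m.keys.map (fun k => by_m.getD k []) :=
    PySem.Dict.values_eq_map_keys by_m hnd []
  have hgetD : ∀ m, by_m.getD m [] = filterM m schedule := by
    intro m
    have : by_m = (schedule.map (fun s => (pvKey s "machine_id", s))).foldl
        (fun d p => d.modify p.1 [] (fun l => l ++ [p.2])) PySem.Dict.empty := by
      rw [List.foldl_map]
    rw [this, PySem.Dict.getD_foldl_modify_append]
    simp [PySem.Dict.empty, PySem.Dict.getD, PySem.Dict.get?, List.filter_map, filterM,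
      List.map_map, Function.comp_def]
  -- inner loop = acc + adjCount (sorted segs)
  have hbody : (fun (changeovers : Int) segs =>
      let segs2 := PySem.List.sorted segs (fun x => pvKey x "start")
      (segs2.zip (PySem.List.slice segs2 (some 1))).foldl
        (fun c ab => if pvKey ab.1 "job_id" ≠ pvKey ab.2 "job_id" then c + 1 else c) changeovers)
      = (fun acc segs => acc + adjCount (PySem.List.sorted segs (fun x => pvKey x "start"))) := by
    funext acc segs
    simp only []
    rw [PySem.List.slice_from _ (by norm_num : (0:Int) ≤ 1)]
    rw [show Int.toNat 1 = 1 from rfl, lem_zipfold]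
  rw [hbody, PySem.List.foldl_add, hvals, hkeys, List.map_map]
  simp only [Function.comp_def]
  have : ∀ m ∈ machines schedule,
      adjCount (PySem.List.sorted (by_m.getD m []) (fun x => pvKey x "start"))
        = adjCount (PySem.List.sorted (filterM m schedule) (fun x => pvKey x "start")) := by
    intro m _; rw [hgetD]
  rw [List.map_congr_left this]
  ring

theorem machines_append (X : List (List (String × Int))) (e : List (String × Int)) :
    machines (X ++ [e]) = if pvKey e "machine_id" ∈ machines X then machines X
      else machines X ++ [pvKey e "machine_id"] := by
  have hofl : ∀ (l : List Int) (x : Int),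
      PySem.Set.ofList (l ++ [x]) = PySem.Set.add (PySem.Set.ofList l) x := by
    intro l x
    show List.foldl PySem.Set.add PySem.Set.empty (l ++ [x]) = _
    rw [List.foldl_append]; rfl
  unfold machines
  rw [List.map_append, List.map_cons, List.map_nil, hofl]
  by_cases hm : pvKey e "machine_id" ∈ PySem.Set.ofList (X.map (fun s => pvKey s "machine_id"))
  · rw [if_pos hm]; simp [PySem.Set.add, PySem.Set.contains, hm]
  · rw [if_neg hm]; simp [PySem.Set.add, PySem.Set.contains, hm]

theorem filterM_not_mem (X : List (List (String × Int))) (m : Int) (h : m ∉ machines X) :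
    filterM m X = [] := by
  rw [filterM, List.filter_eq_nil_iff]
  intro s hs hbeq
  exact h ((PySem.Set.mem_ofList _ _).mpr (List.mem_map.mpr ⟨s, hs, by simpa using hbeq⟩))
theorem filterM_append_self (X : List (List (String × Int))) (e : List (String × Int)) :
    filterM (pvKey e "machine_id") (X ++ [e]) = filterM (pvKey e "machine_id") X ++ [e] := by
  simp [filterM]
theorem filterM_append_other (X : List (List (String × Int))) (e : List (String × Int)) (m : Int)
    (h : m ≠ pvKey e "machine_id") :
    filterM m (X ++ [e]) = filterM m X := by
  simp [filterM, List.filter_append]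
  intro hh; exact absurd hh.symm h

theorem lem_bcount (X : List (List (String × Int))) :
    (X.foldl pvBStep ((0 : Int), (PySem.Dict.empty : PySem.Dict Int (List (String × Int))))).1
      = ((machines X).map (fun m => adjCount (filterM m X))).sum := by
  induction X using List.reverseRecOn with
  | nil => simp [machines, PySem.Set.ofList, PySem.Set.empty]
  | append_singleton X e ih =>
    rw [List.foldl_append, List.foldl_cons, List.foldl_nil, lem_bstep]
    simp only []
    rw [ih, lem_bdict, machines_append]
    set me := pvKey e "machine_id" with hme
    by_cases hmem : me ∈ machines X
    · rw [if_pos hmem]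
      rw [lem_sum_update (machines X) (fun m => adjCount (filterM m X))
        (fun m => adjCount (filterM m (X ++ [e]))) me (delta (filterM me X).getLast? (pvKey e "job_id"))
        (PySem.Set.nodup_ofList _) hmem ?_ ?_]
      · simp only []
        rw [filterM_append_self, lem_adj_append]
      · intro m hm hne
        simp only []
        rw [filterM_append_other X e m hne]
    · rw [if_neg hmem, List.map_append, List.sum_append]
      have h1 : (machines X).map (fun m => adjCount (filterM m (X ++ [e])))
          = (machines X).map (fun m => adjCount (filterM m X)) := by
        apply List.map_congr_left
        intro m hm
        rw [filterM_append_other X e m (fun hh => hmem (by rw [hme, ← hh]; exact hm))]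
      have h2 : filterM me (X ++ [e]) = [e] := by
        rw [filterM_append_self, filterM_not_mem X me hmem]
        rfl
      have h3 : (filterM me X).getLast? = none := by
        rw [filterM_not_mem X me hmem]; rfl
      rw [h1, h3]
      simp [h2, adjCount, delta]

theorem final (schedule : List (List (String × Int))) :
    count_changeovers_py schedule = count_changeovers_py_alt schedule := by
  rw [lem_A, count_changeovers_py_alt, lem_bcount]
  set S := PySem.List.sorted schedule (fun x => pvKey x "start") with hS
  have hfilt : ∀ m, filterM m S = PySem.List.sorted (filterM m schedule) (fun x => pvKey x "start") := by
    intro m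
    rw [filterM, hS, lem_sorted_filter]
    rfl
  have hmapeq : (machines S).map (fun m => adjCount (filterM m S))
      = (machines S).map (fun m => adjCount (PySem.List.sorted (filterM m schedule) (fun x => pvKey x "start"))) := by
    apply List.map_congr_left; intro m _; rw [hfilt]
  rw [hmapeq]
  have hperm : (machines S).Perm (machines schedule) := by
    apply List.perm_of_nodup_nodup_toFinset_eq (PySem.Set.nodup_ofList _) (PySem.Set.nodup_ofList _)
    ext a
    simp only [List.mem_toFinset, PySem.Set.mem_ofList, List.mem_map]
    constructor
    · rintro ⟨s, hs, rfl⟩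
      exact ⟨s, (PySem.List.mem_sorted _ _ _ _).mp hs, rfl⟩
    · rintro ⟨s, hs, rfl⟩
      exact ⟨s, (PySem.List.mem_sorted _ _ _ _).mpr hs, rfl⟩
  exact List.Perm.sum_eq (hperm.symm.map (fun m => adjCount (PySem.List.sorted (filterM m schedule) (fun x => pvKey x "start"))))

-- ===== VERDICT (by name: the statement is the Claim_ definition above) =====
theorem count_changeovers_py_spec : Claim_equal_count_changeovers_py := by
  intro schedule _dom _pre
  show count_changeovers_py schedule = count_changeovers_py_alt schedule
  exact final schedule
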